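-- pv_equiv track=rewrite | github.com/PhilipiGomes/coisas | battleship.py | generate_placements_for_length
-- ===== SOURCE A (Python) =====
-- from typing import List, Tuple, Dict
--
-- def bit_index(r: int, c: int, cols: int) -> int:
--     return r * cols + c
--
-- def bits_from_cells(cells: List[Tuple[int, int]], cols: int) -> int:
--     bits = 0
--     for r, c in cells:
--         bits |= 1 << bit_index(r, c, cols)
--     return bits
--
-- def neighbors_mask_for_cells(cells: List[Tuple[int, int]], rows: int, cols: int) -> int:
--     mask = 0
--     for r, c in cells:
--         for dr in (-1, 0, 1):
--             for dc in (-1, 0, 1):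
--                 rr = r + dr
--                 cc = c + dc
--                 if 0 <= rr < rows and 0 <= cc < cols:
--                     mask |= 1 << bit_index(rr, cc, cols)
--     return mask
--
-- def generate_placements_for_length(length: int, rows: int, cols: int):
--     bits_list = []
--     adj_list = []
--     for r in range(rows):
--         for c in range(cols):
--             if c + length <= cols:
--                 cells = [(r, c + i) for i in range(length)]
--                 bits = bits_from_cells(cells, cols)
--                 adj = neighbors_mask_for_cells(cells, rows, cols)
--                 bits_list.append(bits)
--                 adj_list.append(adj)
--             if r + length <= rows and length > 1:
--                 cells = [(r + i, c) for i in range(length)]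
--                 bits = bits_from_cells(cells, cols)
--                 adj = neighbors_mask_for_cells(cells, rows, cols)
--                 bits_list.append(bits)
--                 adj_list.append(adj)
--     return tuple(bits_list), tuple(adj_list)
-- ===== SOURCE B (Python) =====
-- def rect_mask(r0, r1, c0, c1, cols):
--     # OR a run of ones (columns c0..c1) into each row r0..r1
--     run = (((1 << (c1 - c0 + 1)) - 1) << c0) if c1 >= c0 else 0
--     mask = 0
--     for r in range(r0, r1 + 1):
--         mask |= run << (r * cols)
--     return mask
--
-- def generate_placements_for_length(length, rows, cols):
--     if length < 1:
--         return (), ()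
--     bits_list = []
--     adj_list = []
--     for r in range(rows):
--         for c in range(cols):
--             if c + length <= cols:
--                 bits_list.append(rect_mask(r, r, c, c + length - 1, cols))
--                 adj_list.append(rect_mask(max(0, r - 1), min(rows - 1, r + 1),
--                                           max(0, c - 1), min(cols - 1, c + length), cols))
--             if r + length <= rows and length > 1:
--                 bits_list.append(rect_mask(r, r + length - 1, c, c, cols))
--                 adj_list.append(rect_mask(max(0, r - 1), min(rows - 1, r + length),
--                                           max(0, c - 1), min(cols - 1, c + 1), cols))
--     return tuple(bits_list), tuple(adj_list)
-- ===== Notes on version B (the rewrite author's own statement) =====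
-- stated objective: alternative
-- what changed: Each placement's occupancy and neighbor masks are built as closed-form clamped rectangle fills (a run of ones shifted per row) instead of per-cell bit-by-bit ORs and a 3x3 per-cell neighbor scan.
-- intended difference: For non-positive length with rows>=1 and cols>=1, A returns rows*cols placements of all-zero masks for a non-existent ship, while B returns empty tuples; an empty placement list is the intended result for a ship of non-positive length. — e.g. on generate_placements_for_length(0, 1, 1): A returns ([0], [0]), B returns ([], [])
import Mathlib
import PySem

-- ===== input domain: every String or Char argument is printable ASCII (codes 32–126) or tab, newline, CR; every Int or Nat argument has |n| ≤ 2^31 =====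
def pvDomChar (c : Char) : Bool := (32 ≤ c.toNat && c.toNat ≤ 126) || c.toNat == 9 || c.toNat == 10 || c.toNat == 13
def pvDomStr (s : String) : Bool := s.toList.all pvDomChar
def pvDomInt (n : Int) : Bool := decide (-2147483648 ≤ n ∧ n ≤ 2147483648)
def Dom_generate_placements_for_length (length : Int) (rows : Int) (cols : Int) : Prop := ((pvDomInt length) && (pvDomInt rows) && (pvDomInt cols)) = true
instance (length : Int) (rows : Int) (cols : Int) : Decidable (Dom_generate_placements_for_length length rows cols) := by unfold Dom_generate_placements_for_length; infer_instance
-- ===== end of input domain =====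

-- B builds each placement's occupancy and neighbor masks as closed-form clamped rectangle fills
-- (a run of ones shifted into each covered row) instead of A's per-cell bit ORs and per-cell 3x3
-- neighbor scans; for non-positive lengths B intentionally returns empty lists where A returns
-- rows*cols all-zero placements (see D_ below).


-- ===== PORT A =====
-- masks are nonnegative Python ints built with | and <<; they are computed in Nat (exact: every
-- set bit index is nonnegative at every call site) and cast to Int where A stores them

def pvBitIndex (r : Int) (c : Int) (cols : Int) : Int := r * cols + c

def pvBitsFromCells (cells : List (Int × Int)) (cols : Int) : Nat :=
  cells.foldl (fun bits rc => bits ||| (1 <<< (pvBitIndex rc.1 rc.2 cols).toNat)) 0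

def pvNeighborsMask (cells : List (Int × Int)) (rows : Int) (cols : Int) : Nat :=
  cells.foldl (fun mask rc =>
    ([-1, 0, 1] : List Int).foldl (fun mask dr =>
      ([-1, 0, 1] : List Int).foldl (fun mask dc =>
        if 0 ≤ rc.1 + dr ∧ rc.1 + dr < rows ∧ 0 ≤ rc.2 + dc ∧ rc.2 + dc < cols then
          mask ||| (1 <<< (pvBitIndex (rc.1 + dr) (rc.2 + dc) cols).toNat)
        else mask) mask) mask) 0

def generate_placements_for_length (length : Int) (rows : Int) (cols : Int) : List Int × List Int :=
  (PySem.List.pyRange 0 rows 1).foldl (fun st r =>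
    (PySem.List.pyRange 0 cols 1).foldl (fun st c =>
      let st1 :=
        if c + length ≤ cols then
          (st.1 ++ [(pvBitsFromCells ((PySem.List.pyRange 0 length 1).map (fun i => (r, c + i))) cols : Int)],
           st.2 ++ [(pvNeighborsMask ((PySem.List.pyRange 0 length 1).map (fun i => (r, c + i))) rows cols : Int)])
        else st
      if r + length ≤ rows ∧ length > 1 then
        (st1.1 ++ [(pvBitsFromCells ((PySem.List.pyRange 0 length 1).map (fun i => (r + i, c))) cols : Int)],
         st1.2 ++ [(pvNeighborsMask ((PySem.List.pyRange 0 length 1).map (fun i => (r + i, c))) rows cols : Int)])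
      else st1) st) (([], []) : List Int × List Int)

-- ===== PORT B =====
-- rect_mask: a run of ones for columns c0..c1, OR'd into every row r0..r1; computed in Nat
-- (exact: every call passes 0 ≤ r0, 0 ≤ c0, 0 ≤ r * cols, so shift amounts equal Python's)

def pvRectMask (r0 : Int) (r1 : Int) (c0 : Int) (c1 : Int) (cols : Int) : Nat :=
  let run : Nat := if c0 ≤ c1 then ((1 <<< (c1 - c0 + 1).toNat) - 1) <<< c0.toNat else 0
  (PySem.List.pyRange r0 (r1 + 1) 1).foldl (fun mask r => mask ||| (run <<< (r * cols).toNat)) 0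

def generate_placements_for_length_alt (length : Int) (rows : Int) (cols : Int) : List Int × List Int :=
  if length < 1 then ([], []) else
  (PySem.List.pyRange 0 rows 1).foldl (fun st r =>
    (PySem.List.pyRange 0 cols 1).foldl (fun st c =>
      let st1 :=
        if c + length ≤ cols then
          (st.1 ++ [(pvRectMask r r c (c + length - 1) cols : Int)],
           st.2 ++ [(pvRectMask (max 0 (r - 1)) (min (rows - 1) (r + 1)) (max 0 (c - 1)) (min (cols - 1) (c + length)) cols : Int)])
        else st
      if r + length ≤ rows ∧ length > 1 then
        (st1.1 ++ [(pvRectMask r (r + length - 1) c c cols : Int)],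
         st1.2 ++ [(pvRectMask (max 0 (r - 1)) (min (rows - 1) (r + length)) (max 0 (c - 1)) (min (cols - 1) (c + 1)) cols : Int)])
      else st1) st) (([], []) : List Int × List Int)

-- ===== PRECONDITION & SPEC =====
-- For non-positive length with a nonempty grid, A returns rows*cols placements of all-zero masks
-- for a non-existent ship, while B returns empty tuples; the empty placement list is the intended
-- result for a ship of non-positive length.
def D_generate_placements_for_length (length : Int) (rows : Int) (cols : Int) : Prop :=
  length ≤ 0 ∧ 1 ≤ rows ∧ 1 ≤ cols
instance (length : Int) (rows : Int) (cols : Int) : Decidable (D_generate_placements_for_length length rows cols) := by unfold D_generate_placements_for_length; infer_instance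

def Spec_generate_placements_for_length (length : Int) (rows : Int) (cols : Int) (out : List Int × List Int) : Prop := ¬ D_generate_placements_for_length length rows cols → out = generate_placements_for_length_alt length rows cols
instance (length : Int) (rows : Int) (cols : Int) (out : List Int × List Int) : Decidable (Spec_generate_placements_for_length length rows cols out) := by unfold Spec_generate_placements_for_length; infer_instance

def pvDiffWitness_generate_placements_for_length : Int × Int × Int := (0, 1, 1)
def pvDiffWitnessOut_generate_placements_for_length : (List Int × List Int) × (List Int × List Int) := (([0], [0]), ([], []))

-- ===== CLAIM (what is proved, stated in full; the proofs are below) =====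
def Claim_unchanged_generate_placements_for_length : Prop := ∀ (length : Int) (rows : Int) (cols : Int), Dom_generate_placements_for_length length rows cols → Spec_generate_placements_for_length length rows cols (generate_placements_for_length length rows cols)
def Claim_changed_generate_placements_for_length : Prop := Dom_generate_placements_for_length (pvDiffWitness_generate_placements_for_length.1) (pvDiffWitness_generate_placements_for_length.2.1) (pvDiffWitness_generate_placements_for_length.2.2) ∧ D_generate_placements_for_length (pvDiffWitness_generate_placements_for_length.1) (pvDiffWitness_generate_placements_for_length.2.1) (pvDiffWitness_generate_placements_for_length.2.2) ∧ generate_placements_for_length (pvDiffWitness_generate_placements_for_length.1) (pvDiffWitness_generate_placements_for_length.2.1) (pvDiffWitness_generate_placements_for_length.2.2) = pvDiffWitnessOut_generate_placements_for_length.1 ∧ generate_placements_for_length_alt (pvDiffWitness_generate_placements_for_length.1) (pvDiffWitness_generate_placements_for_length.2.1) (pvDiffWitness_generate_placements_for_length.2.2) = pvDiffWitnessOut_generate_placements_for_length.2 ∧ pvDiffWitnessOut_generate_placements_for_length.1 ≠ pvDiffWitnessOut_generate_placements_for_length.2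
def Claim_exact_generate_placements_for_length : Prop := ∀ (length : Int) (rows : Int) (cols : Int), Dom_generate_placements_for_length length rows cols → D_generate_placements_for_length length rows cols → generate_placements_for_length length rows cols ≠ generate_placements_for_length_alt length rows cols

-- ===== LEMMAS AND PROOFS =====

-- testBit of a foldl whose step ORs a per-element contribution into the accumulator
theorem pv_testBit_foldl {α : Type} (g : Nat → α → Nat) (p : α → Nat → Bool)
    (h : ∀ m x i, (g m x).testBit i = (m.testBit i || p x i)) :
    ∀ (l : List α) (init : Nat) (i : Nat),
      (l.foldl g init).testBit i = (init.testBit i || l.any (fun x => p x i)) := by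
  intro l
  induction l with
  | nil => intro init i; simp
  | cons x xs ih => intro init i; simp [List.foldl_cons, ih, h, Bool.or_assoc]

theorem pv_single_bit (s : Int) (hs : 0 ≤ s) (i : Nat) :
    ((1 <<< s.toNat : Nat).testBit i = true) ↔ (i : Int) = s := by
  rw [Nat.one_shiftLeft, Nat.testBit_two_pow]
  simp only [decide_eq_true_eq]
  omega

theorem pv_run_bit (s c0 c1 : Int) (hs : 0 ≤ s) (hc0 : 0 ≤ c0) (hcc : c0 ≤ c1) (i : Nat) :
    (((((1 <<< (c1 - c0 + 1).toNat) - 1) <<< c0.toNat : Nat) <<< s.toNat).testBit i = true) ↔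
      ∃ cc : Int, c0 ≤ cc ∧ cc ≤ c1 ∧ (i : Int) = s + cc := by
  rw [Nat.testBit_shiftLeft, Nat.testBit_shiftLeft, Nat.one_shiftLeft, Nat.testBit_two_pow_sub_one]
  simp only [Bool.and_eq_true, decide_eq_true_eq]
  constructor
  · rintro ⟨h1, h2, h3⟩
    exact ⟨(i : Int) - s, by omega, by omega, by omega⟩
  · rintro ⟨cc, h1, h2, h3⟩
    exact ⟨by omega, by omega, by omega⟩

theorem pv_rect_testBit (r0 r1 c0 c1 cols : Int) (h0 : 0 ≤ r0) (hc0 : 0 ≤ c0) (hcols : 0 ≤ cols) (i : Nat) :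
    ((pvRectMask r0 r1 c0 c1 cols).testBit i = true) ↔
      ∃ rr : Int, r0 ≤ rr ∧ rr ≤ r1 ∧ ∃ cc : Int, c0 ≤ cc ∧ cc ≤ c1 ∧ (i : Int) = rr * cols + cc := by
  unfold pvRectMask
  by_cases hcc : c0 ≤ c1
  · rw [if_pos hcc,
      pv_testBit_foldl _
        (fun r j => ((((1 <<< (c1 - c0 + 1).toNat) - 1) <<< c0.toNat : Nat) <<< (r * cols).toNat).testBit j)
        (by intro m x j; rw [Nat.testBit_or])]
    simp only [Nat.zero_testBit, Bool.false_or, List.any_eq_true, PySem.List.mem_pyRange_one]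
    constructor
    · rintro ⟨rr, ⟨ha, hb⟩, hbit⟩
      obtain ⟨cc, h1, h2, h3⟩ :=
        (pv_run_bit (rr * cols) c0 c1 (mul_nonneg (le_trans h0 ha) hcols) hc0 hcc i).1 hbit
      exact ⟨rr, ha, by omega, cc, h1, h2, h3⟩
    · rintro ⟨rr, ha, hb, cc, h1, h2, h3⟩
      exact ⟨rr, ⟨ha, by omega⟩,
        (pv_run_bit (rr * cols) c0 c1 (mul_nonneg (le_trans h0 ha) hcols) hc0 hcc i).2 ⟨cc, h1, h2, h3⟩⟩
  · rw [if_neg hcc,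
      pv_testBit_foldl _
        (fun r j => ((0 : Nat) <<< (r * cols).toNat).testBit j)
        (by intro m x j; rw [Nat.testBit_or])]
    simp only [Nat.zero_shiftLeft, Nat.zero_testBit, Bool.false_or, List.any_eq_true]
    constructor
    · rintro ⟨x, _, h⟩; exact absurd h (by simp)
    · rintro ⟨rr, _, _, cc, h1, h2, _⟩; omega

theorem pv_bits_testBit (cells : List (Int × Int)) (cols : Int)
    (h : ∀ p ∈ cells, 0 ≤ pvBitIndex p.1 p.2 cols) (i : Nat) :
    ((pvBitsFromCells cells cols).testBit i = true) ↔
      ∃ p ∈ cells, (i : Int) = pvBitIndex p.1 p.2 cols := by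
  unfold pvBitsFromCells
  rw [pv_testBit_foldl _
      (fun rc j => ((1 <<< (pvBitIndex rc.1 rc.2 cols).toNat : Nat)).testBit j)
      (by intro m x j; rw [Nat.testBit_or])]
  simp only [Nat.zero_testBit, Bool.false_or, List.any_eq_true]
  constructor
  · rintro ⟨p, hp, hb⟩; exact ⟨p, hp, (pv_single_bit _ (h p hp) i).1 hb⟩
  · rintro ⟨p, hp, he⟩; exact ⟨p, hp, (pv_single_bit _ (h p hp) i).2 he⟩

theorem pv_nb_testBit (cells : List (Int × Int)) (rows cols : Int) (hcols : 0 ≤ cols) (i : Nat) :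
    ((pvNeighborsMask cells rows cols).testBit i = true) ↔
      ∃ p ∈ cells, ∃ dr ∈ ([-1, 0, 1] : List Int), ∃ dc ∈ ([-1, 0, 1] : List Int),
        (0 ≤ p.1 + dr ∧ p.1 + dr < rows ∧ 0 ≤ p.2 + dc ∧ p.2 + dc < cols) ∧
        (i : Int) = pvBitIndex (p.1 + dr) (p.2 + dc) cols := by
  have hdc : ∀ (rc : Int × Int) (dr : Int) (m : Nat) (j : Nat),
      (([-1, 0, 1] : List Int).foldl (fun mask dc =>
          if 0 ≤ rc.1 + dr ∧ rc.1 + dr < rows ∧ 0 ≤ rc.2 + dc ∧ rc.2 + dc < cols then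
            mask ||| (1 <<< (pvBitIndex (rc.1 + dr) (rc.2 + dc) cols).toNat)
          else mask) m).testBit j
      = (m.testBit j || ([-1, 0, 1] : List Int).any (fun dc =>
          decide (0 ≤ rc.1 + dr ∧ rc.1 + dr < rows ∧ 0 ≤ rc.2 + dc ∧ rc.2 + dc < cols) &&
          ((1 <<< (pvBitIndex (rc.1 + dr) (rc.2 + dc) cols).toNat : Nat)).testBit j)) := by
    intro rc dr m j
    have hstep : ∀ (m' : Nat) (dc : Int) (j' : Nat),
        ((if 0 ≤ rc.1 + dr ∧ rc.1 + dr < rows ∧ 0 ≤ rc.2 + dc ∧ rc.2 + dc < cols then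
            m' ||| (1 <<< (pvBitIndex (rc.1 + dr) (rc.2 + dc) cols).toNat)
          else m').testBit j')
        = (m'.testBit j' || (decide (0 ≤ rc.1 + dr ∧ rc.1 + dr < rows ∧ 0 ≤ rc.2 + dc ∧ rc.2 + dc < cols) &&
            ((1 <<< (pvBitIndex (rc.1 + dr) (rc.2 + dc) cols).toNat : Nat)).testBit j')) := by
      intro m' dc j'
      by_cases hC : 0 ≤ rc.1 + dr ∧ rc.1 + dr < rows ∧ 0 ≤ rc.2 + dc ∧ rc.2 + dc < cols
      · rw [if_pos hC, Nat.testBit_or]; simp [hC]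
      · rw [if_neg hC]; simp [hC]
    exact pv_testBit_foldl _ _ hstep _ m j
  have hdr : ∀ (rc : Int × Int) (m : Nat) (j : Nat),
      (([-1, 0, 1] : List Int).foldl (fun mask dr =>
        ([-1, 0, 1] : List Int).foldl (fun mask dc =>
          if 0 ≤ rc.1 + dr ∧ rc.1 + dr < rows ∧ 0 ≤ rc.2 + dc ∧ rc.2 + dc < cols then
            mask ||| (1 <<< (pvBitIndex (rc.1 + dr) (rc.2 + dc) cols).toNat)
          else mask) mask) m).testBit j
      = (m.testBit j || ([-1, 0, 1] : List Int).any (fun dr => ([-1, 0, 1] : List Int).any (fun dc =>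
          decide (0 ≤ rc.1 + dr ∧ rc.1 + dr < rows ∧ 0 ≤ rc.2 + dc ∧ rc.2 + dc < cols) &&
          ((1 <<< (pvBitIndex (rc.1 + dr) (rc.2 + dc) cols).toNat : Nat)).testBit j))) := by
    intro rc m j
    exact pv_testBit_foldl _ _ (fun m' dr j' => hdc rc dr m' j') _ m j
  unfold pvNeighborsMask
  rw [pv_testBit_foldl _
      (fun rc j => ([-1, 0, 1] : List Int).any (fun dr => ([-1, 0, 1] : List Int).any (fun dc =>
        decide (0 ≤ rc.1 + dr ∧ rc.1 + dr < rows ∧ 0 ≤ rc.2 + dc ∧ rc.2 + dc < cols) &&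
        ((1 <<< (pvBitIndex (rc.1 + dr) (rc.2 + dc) cols).toNat : Nat)).testBit j)))
      (fun m rc j => hdr rc m j)]
  simp only [Nat.zero_testBit, Bool.false_or, List.any_eq_true, Bool.and_eq_true, decide_eq_true_eq]
  constructor
  · rintro ⟨p, hp, dr, hdrm, dc, hdcm, hC, hbit⟩
    have hnn : 0 ≤ pvBitIndex (p.1 + dr) (p.2 + dc) cols := by
      have := mul_nonneg hC.1 hcols
      simp only [pvBitIndex]; omega
    exact ⟨p, hp, dr, hdrm, dc, hdcm, hC, (pv_single_bit _ hnn i).1 hbit⟩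
  · rintro ⟨p, hp, dr, hdrm, dc, hdcm, hC, he⟩
    have hnn : 0 ≤ pvBitIndex (p.1 + dr) (p.2 + dc) cols := by
      have := mul_nonneg hC.1 hcols
      simp only [pvBitIndex]; omega
    exact ⟨p, hp, dr, hdrm, dc, hdcm, hC, (pv_single_bit _ hnn i).2 he⟩

-- the four per-placement mask identities

theorem pv_hbits (length cols r c : Int) (hr : 0 ≤ r) (hc : 0 ≤ c) (hcols : 0 ≤ cols)
    (_hl : 1 ≤ length) (_hcl : c + length ≤ cols) :
    pvBitsFromCells ((PySem.List.pyRange 0 length 1).map (fun i => (r, c + i))) cols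
      = pvRectMask r r c (c + length - 1) cols := by
  have hnn : ∀ p ∈ (PySem.List.pyRange 0 length 1).map (fun i => (r, c + i)),
      0 ≤ pvBitIndex p.1 p.2 cols := by
    intro p hp
    simp only [List.mem_map, PySem.List.mem_pyRange_one] at hp
    obtain ⟨k, ⟨hk0, hk1⟩, rfl⟩ := hp
    have := mul_nonneg hr hcols
    simp only [pvBitIndex]; omega
  apply Nat.eq_of_testBit_eq
  intro i
  rw [Bool.eq_iff_iff, pv_bits_testBit _ _ hnn i, pv_rect_testBit r r c (c + length - 1) cols hr hc hcols i]
  simp only [List.mem_map, PySem.List.mem_pyRange_one, pvBitIndex]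
  constructor
  · rintro ⟨p, ⟨k, ⟨hk0, hk1⟩, rfl⟩, he⟩
    dsimp only at he
    exact ⟨r, le_refl r, le_refl r, c + k, by omega, by omega, he⟩
  · rintro ⟨rr, h1, h2, cc, h3, h4, he⟩
    have hrr : rr = r := le_antisymm h2 h1
    subst hrr
    refine ⟨(rr, c + (cc - c)), ⟨cc - c, ⟨by omega, by omega⟩, rfl⟩, ?_⟩
    dsimp only
    linear_combination he

theorem pv_vbits (length rows cols r c : Int) (hr : 0 ≤ r) (hc : 0 ≤ c) (hcols : 0 ≤ cols)
    (_hl : 1 ≤ length) (_hrl : r + length ≤ rows) :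
    pvBitsFromCells ((PySem.List.pyRange 0 length 1).map (fun i => (r + i, c))) cols
      = pvRectMask r (r + length - 1) c c cols := by
  have hnn : ∀ p ∈ (PySem.List.pyRange 0 length 1).map (fun i => (r + i, c)),
      0 ≤ pvBitIndex p.1 p.2 cols := by
    intro p hp
    simp only [List.mem_map, PySem.List.mem_pyRange_one] at hp
    obtain ⟨k, ⟨hk0, hk1⟩, rfl⟩ := hp
    have := mul_nonneg (show (0:Int) ≤ r + k by omega) hcols
    simp only [pvBitIndex]; omega
  apply Nat.eq_of_testBit_eq
  intro i
  rw [Bool.eq_iff_iff, pv_bits_testBit _ _ hnn i, pv_rect_testBit r (r + length - 1) c c cols hr hc hcols i]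
  simp only [List.mem_map, PySem.List.mem_pyRange_one, pvBitIndex]
  constructor
  · rintro ⟨p, ⟨k, ⟨hk0, hk1⟩, rfl⟩, he⟩
    dsimp only at he
    exact ⟨r + k, by omega, by omega, c, le_refl c, le_refl c, he⟩
  · rintro ⟨rr, h1, h2, cc, h3, h4, he⟩
    have hcc : cc = c := le_antisymm h4 h3
    subst hcc
    refine ⟨(r + (rr - r), cc), ⟨rr - r, ⟨by omega, by omega⟩, rfl⟩, ?_⟩
    dsimp only
    linear_combination he

theorem pv_hadj (length rows cols r c : Int) (hr : 0 ≤ r) (hrw : r < rows) (hc : 0 ≤ c)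
    (hcols : 0 ≤ cols) (hl : 1 ≤ length) (hcl : c + length ≤ cols) :
    pvNeighborsMask ((PySem.List.pyRange 0 length 1).map (fun i => (r, c + i))) rows cols
      = pvRectMask (max 0 (r - 1)) (min (rows - 1) (r + 1)) (max 0 (c - 1)) (min (cols - 1) (c + length)) cols := by
  apply Nat.eq_of_testBit_eq
  intro i
  rw [Bool.eq_iff_iff, pv_nb_testBit _ rows cols hcols i,
    pv_rect_testBit _ _ _ _ cols (by omega) (by omega) hcols i]
  simp only [List.mem_map, PySem.List.mem_pyRange_one, pvBitIndex]
  constructor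
  · rintro ⟨p, ⟨k, ⟨hk0, hk1⟩, rfl⟩, dr, hdrm, dc, hdcm, hC, he⟩
    dsimp only at hC he
    have hdr3 : dr = -1 ∨ dr = 0 ∨ dr = 1 := by simpa using hdrm
    have hdc3 : dc = -1 ∨ dc = 0 ∨ dc = 1 := by simpa using hdcm
    obtain ⟨g1, g2, g3, g4⟩ := hC
    exact ⟨r + dr, by omega, by omega, c + k + dc, by omega, by omega, by linear_combination he⟩
  · rintro ⟨rr, h1, h2, cc, h3, h4, he⟩
    refine ⟨(r, c + max 0 (min (length - 1) (cc - c))),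
        ⟨max 0 (min (length - 1) (cc - c)), ⟨by omega, by omega⟩, rfl⟩,
        rr - r, by simp; omega,
        cc - (c + max 0 (min (length - 1) (cc - c))), by simp; omega, ?_, ?_⟩
    · dsimp only
      refine ⟨by omega, by omega, by omega, by omega⟩
    · dsimp only
      linear_combination he

theorem pv_vadj (length rows cols r c : Int) (hr : 0 ≤ r) (hc : 0 ≤ c) (hcw : c < cols)
    (hcols : 0 ≤ cols) (hl : 1 ≤ length) (hrl : r + length ≤ rows) :
    pvNeighborsMask ((PySem.List.pyRange 0 length 1).map (fun i => (r + i, c))) rows cols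
      = pvRectMask (max 0 (r - 1)) (min (rows - 1) (r + length)) (max 0 (c - 1)) (min (cols - 1) (c + 1)) cols := by
  apply Nat.eq_of_testBit_eq
  intro i
  rw [Bool.eq_iff_iff, pv_nb_testBit _ rows cols hcols i,
    pv_rect_testBit _ _ _ _ cols (by omega) (by omega) hcols i]
  simp only [List.mem_map, PySem.List.mem_pyRange_one, pvBitIndex]
  constructor
  · rintro ⟨p, ⟨k, ⟨hk0, hk1⟩, rfl⟩, dr, hdrm, dc, hdcm, hC, he⟩
    dsimp only at hC he
    have hdr3 : dr = -1 ∨ dr = 0 ∨ dr = 1 := by simpa using hdrm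
    have hdc3 : dc = -1 ∨ dc = 0 ∨ dc = 1 := by simpa using hdcm
    obtain ⟨g1, g2, g3, g4⟩ := hC
    exact ⟨r + k + dr, by omega, by omega, c + dc, by omega, by omega, by linear_combination he⟩
  · rintro ⟨rr, h1, h2, cc, h3, h4, he⟩
    refine ⟨(r + max 0 (min (length - 1) (rr - r)), c),
        ⟨max 0 (min (length - 1) (rr - r)), ⟨by omega, by omega⟩, rfl⟩,
        rr - (r + max 0 (min (length - 1) (rr - r))), by simp; omega,
        cc - c, by simp; omega, ?_, ?_⟩
    · dsimp only
      refine ⟨by omega, by omega, by omega, by omega⟩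
    · dsimp only
      linear_combination he

-- A = B for positive length
theorem pv_main (length rows cols : Int) (hl : 1 ≤ length) :
    generate_placements_for_length length rows cols = generate_placements_for_length_alt length rows cols := by
  unfold generate_placements_for_length generate_placements_for_length_alt
  rw [if_neg (by omega)]
  apply PySem.List.foldl_congr_mem
  intro st r hrm
  rw [PySem.List.mem_pyRange_one] at hrm
  apply PySem.List.foldl_congr_mem
  intro st' c hcm
  rw [PySem.List.mem_pyRange_one] at hcm
  have hcols : 0 ≤ cols := by omega
  by_cases h1 : c + length ≤ cols
  · by_cases h2 : r + length ≤ rows ∧ length > 1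
    · simp only [if_pos h1, if_pos h2,
        pv_hbits length cols r c (by omega) (by omega) hcols hl h1,
        pv_hadj length rows cols r c (by omega) (by omega) (by omega) hcols hl h1,
        pv_vbits length rows cols r c (by omega) (by omega) hcols hl h2.1,
        pv_vadj length rows cols r c (by omega) (by omega) (by omega) hcols hl h2.1]
    · simp only [if_pos h1, if_neg h2,
        pv_hbits length cols r c (by omega) (by omega) hcols hl h1,
        pv_hadj length rows cols r c (by omega) (by omega) (by omega) hcols hl h1]
  · by_cases h2 : r + length ≤ rows ∧ length > 1
    · simp only [if_neg h1, if_pos h2,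
        pv_vbits length rows cols r c (by omega) (by omega) hcols hl h2.1,
        pv_vadj length rows cols r c (by omega) (by omega) (by omega) hcols hl h2.1]
    · simp only [if_neg h1, if_neg h2]

-- the first component's length never shrinks along a fold
theorem pv_len_mono {α : Type} (f : List Int × List Int → α → List Int × List Int)
    (hf : ∀ st x, st.1.length ≤ (f st x).1.length) :
    ∀ (l : List α) (st : List Int × List Int), st.1.length ≤ (l.foldl f st).1.length := by
  intro l
  induction l with
  | nil => intro st; simp
  | cons x xs ih => intro st; exact le_trans (hf st x) (ih (f st x))

-- ===== VERDICT (by name: the statement is the Claim_ definition above) =====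
theorem generate_placements_for_length_spec : Claim_unchanged_generate_placements_for_length := by
  intro length rows cols _ hnD
  by_cases hl : 1 ≤ length
  · exact pv_main length rows cols hl
  · have h : rows ≤ 0 ∨ cols ≤ 0 := by
      by_contra hcon
      exact hnD ⟨by omega, by omega, by omega⟩
    have halt : generate_placements_for_length_alt length rows cols = ([], []) := by
      unfold generate_placements_for_length_alt
      rw [if_pos (by omega)]
    rw [halt]
    unfold generate_placements_for_length
    rcases h with h | h
    · rw [show PySem.List.pyRange 0 rows 1 = [] from PySem.List.pyRange_one_eq_nil (by omega)]
      rfl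
    · have hnil : PySem.List.pyRange 0 cols 1 = [] := PySem.List.pyRange_one_eq_nil (by omega)
      simp only [hnil, List.foldl_nil, List.foldl_fixed]

theorem generate_placements_for_length_changed : Claim_changed_generate_placements_for_length := by
  unfold Claim_changed_generate_placements_for_length
  decide

theorem generate_placements_for_length_tight : Claim_exact_generate_placements_for_length := by
  intro length rows cols _ hD
  obtain ⟨hl, hrw, hcw⟩ := hD
  have halt : generate_placements_for_length_alt length rows cols = ([], []) := by
    unfold generate_placements_for_length_alt
    rw [if_pos (by omega)]
  rw [halt]
  intro hEq
  have hlen : 1 ≤ (generate_placements_for_length length rows cols).1.length := by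
    unfold generate_placements_for_length
    rw [PySem.List.pyRange_one_cons (show (0:Int) < rows by omega), List.foldl_cons]
    refine le_trans ?_ (pv_len_mono _ ?_ _ _)
    · -- the very first outer step already appends one placement (at r = 0, c = 0)
      try dsimp only
      rw [PySem.List.pyRange_one_cons (show (0:Int) < cols by omega), List.foldl_cons]
      refine le_trans ?_ (pv_len_mono _ ?_ _ _)
      · dsimp only
        rw [if_pos (show (0:Int) + length ≤ cols by omega),
          if_neg (show ¬((0:Int) + length ≤ rows ∧ length > 1) by omega)]
        simp
      · intro st c
        try dsimp only
        split_ifs <;> simp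
    · intro st r
      try dsimp only
      exact pv_len_mono _ (by intro st' c; split_ifs <;> simp) _ st
  rw [hEq] at hlen
  simp at hlen
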